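-- pv_equiv track=rewrite | github.com/veacheslavv/LFAF_Labs | Lab5/cnf_converter.py | tokenize_rhs
-- ===== SOURCE A (Python) =====
-- def tokenize_rhs(rhs, VN, VT):
--     """
--     Parse a production RHS string into a list of symbols.
--     Handles multi-character non-terminals like X1, X2, etc.
--     """
--     syms = []
--     i = 0
--     # Sort VN by length descending to prefer longer matches
--     sorted_VN = sorted(VN, key=len, reverse=True)
--     while i < len(rhs):
--         matched = False
--         for nt in sorted_VN:
--             if rhs[i:i+len(nt)] == nt:
--                 syms.append(nt)
--                 i += len(nt)
--                 matched = True
--                 break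
--         if not matched:
--             syms.append(rhs[i])
--             i += 1
--     return syms
-- ===== SOURCE B (Python) =====
-- def tokenize_rhs(rhs, VN, VT):
--     """
--     Parse a production RHS string into a list of symbols.
--     Longest match at each position via a set of non-terminals and
--     a descending length scan, instead of sorting VN and testing each one.
--     """
--     vn_set = set(VN)
--     maxlen = 0
--     for nt in VN:
--         if len(nt) > maxlen:
--             maxlen = len(nt)
--     syms = []
--     n = len(rhs)
--     i = 0
--     while i < n:
--         step = 1
--         tok = rhs[i]
--         L = min(maxlen, n - i)
--         while L >= 2:
--             cand = rhs[i:i + L]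
--             if cand in vn_set:
--                 tok = cand
--                 step = L
--                 break
--             L -= 1
--         syms.append(tok)
--         i += step
--     return syms
-- ===== Notes on version B (the rewrite author's own statement) =====
-- stated objective: faster
-- what changed: Replaces A's sort-VN-by-length-and-test-every-candidate scan at each position by a set of the non-terminals plus a precomputed maximum length, probing candidate lengths from longest down with set lookups, so the per-position pass over all of VN disappears.
-- outside the precondition, e.g. on tokenize_rhs('A', ['', 'A'], []): A returns ['A'], B returns ['A']; on tokenize_rhs('AB', ['', 'A'], []): A does not finish within the time limit, B returns ['A', 'B']
import Mathlib
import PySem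

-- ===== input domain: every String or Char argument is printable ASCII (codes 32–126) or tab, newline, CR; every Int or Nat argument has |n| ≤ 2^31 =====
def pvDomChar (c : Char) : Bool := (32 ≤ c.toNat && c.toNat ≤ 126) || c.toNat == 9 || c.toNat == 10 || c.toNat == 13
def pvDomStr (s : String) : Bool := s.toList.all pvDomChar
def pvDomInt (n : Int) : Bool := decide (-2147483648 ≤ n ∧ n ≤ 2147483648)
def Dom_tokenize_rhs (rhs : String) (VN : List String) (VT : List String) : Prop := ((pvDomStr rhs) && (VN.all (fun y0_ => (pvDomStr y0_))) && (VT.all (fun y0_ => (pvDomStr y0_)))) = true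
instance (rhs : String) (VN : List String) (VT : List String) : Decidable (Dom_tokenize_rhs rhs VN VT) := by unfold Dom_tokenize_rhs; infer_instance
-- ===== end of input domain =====

-- B replaces A's sort-VN-and-test-each-candidate scan by a set of the non-terminals plus a
-- descending-length probe at each position (objective: faster — the per-position pass over VN disappears; measured faster in a timing run).

-- ===== PORT A =====
-- inner 'for nt in sorted_VN' with break: first nt whose slice matches.
-- rhs[i:i+len(nt)] == nt is compared on the character lists (string equality ↔ list equality;
-- for 0 ≤ i the slice is (drop i).take len, exactly PySem.List.slice_natCast_add).
def tokenize_rhs_find (sortedVN : List String) (cs : List Char) (i : Nat) : Option String :=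
  match sortedVN with
  | [] => none
  | nt :: rest =>
      if (cs.drop i).take nt.toList.length = nt.toList then some nt
      else tokenize_rhs_find rest cs i

-- the 'while i < len(rhs)' loop; fuel cs.length + 1 suffices since under Pre_ every step advances
-- i by at least 1 (when '' ∈ VN Python can loop forever — those inputs are outside Pre_).
def tokenize_rhs_loop (sortedVN : List String) (cs : List Char) : Nat → Nat → List String → List String
  | 0, _, syms => syms
  | fuel + 1, i, syms =>
      if i < cs.length then
        match tokenize_rhs_find sortedVN cs i with
        | some nt => tokenize_rhs_loop sortedVN cs fuel (i + nt.toList.length) (syms ++ [nt])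
        | none => tokenize_rhs_loop sortedVN cs fuel (i + 1) (syms ++ [String.ofList [cs.getD i ' ']])
      else syms

def tokenize_rhs (rhs : String) (VN : List String) (VT : List String) : List String :=
  let cs := rhs.toList
  let sortedVN := PySem.List.sorted VN (fun nt => nt.toList.length) true
  tokenize_rhs_loop sortedVN cs (cs.length + 1) 0 []

-- ===== PORT B =====
-- maxlen = the for-loop with running maximum in Source B
def tokenize_rhs_alt_maxlen : List String → Nat → Nat
  | [], m => m
  | nt :: rest, m => tokenize_rhs_alt_maxlen rest (if nt.toList.length > m then nt.toList.length else m)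

-- the inner 'while L >= 2' probe: largest L ≤ bound with rhs[i:i+L] in vn_set
def tokenize_rhs_alt_scan (vnSet : PySem.Set String) (cs : List Char) (i : Nat) : Nat → Option Nat
  | 0 => none
  | 1 => none
  | L + 2 =>
      if PySem.Set.contains vnSet (String.ofList ((cs.drop i).take (L + 2))) then some (L + 2)
      else tokenize_rhs_alt_scan vnSet cs i (L + 1)

def tokenize_rhs_alt_loop (vnSet : PySem.Set String) (maxlen : Nat) (cs : List Char) :
    Nat → Nat → List String → List String
  | 0, _, syms => syms
  | fuel + 1, i, syms =>
      if i < cs.length then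
        match tokenize_rhs_alt_scan vnSet cs i (min maxlen (cs.length - i)) with
        | some L => tokenize_rhs_alt_loop vnSet maxlen cs fuel (i + L)
            (syms ++ [String.ofList ((cs.drop i).take L)])
        | none => tokenize_rhs_alt_loop vnSet maxlen cs fuel (i + 1)
            (syms ++ [String.ofList [cs.getD i ' ']])
      else syms

def tokenize_rhs_alt (rhs : String) (VN : List String) (VT : List String) : List String :=
  let cs := rhs.toList
  let vnSet := PySem.Set.ofList VN
  let maxlen := tokenize_rhs_alt_maxlen VN 0
  tokenize_rhs_alt_loop vnSet maxlen cs (cs.length + 1) 0 []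

-- ===== PRECONDITION & SPEC =====
-- Pre_ excludes VN containing the empty string: there A loops forever as soon as some position of
-- rhs is matched by no nonempty non-terminal (the '' candidate matches and advances i by 0).
def Pre_tokenize_rhs (rhs : String) (VN : List String) (VT : List String) : Prop := "" ∉ VN
instance (rhs : String) (VN : List String) (VT : List String) : Decidable (Pre_tokenize_rhs rhs VN VT) := by unfold Pre_tokenize_rhs; infer_instance

def pvWitness_tokenize_rhs : String × List String × List String := ("X1aX2", ["X1", "X2", "S"], ["a", "b"])

def Spec_tokenize_rhs (rhs : String) (VN : List String) (VT : List String) (out : List String) : Prop := out = tokenize_rhs_alt rhs VN VT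
instance (rhs : String) (VN : List String) (VT : List String) (out : List String) : Decidable (Spec_tokenize_rhs rhs VN VT out) := by unfold Spec_tokenize_rhs; infer_instance

-- ===== CLAIM (what is proved, stated in full; the proofs are below) =====
def Claim_equal_tokenize_rhs : Prop := ∀ (rhs : String) (VN : List String) (VT : List String), Dom_tokenize_rhs rhs VN VT → Pre_tokenize_rhs rhs VN VT → Spec_tokenize_rhs rhs VN VT (tokenize_rhs rhs VN VT)

-- ===== LEMMAS AND PROOFS =====

-- abbreviation used only by the proofs: "nt matches rhs at position i"
def pvMatches (cs : List Char) (i : Nat) (nt : String) : Prop :=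
  (cs.drop i).take nt.toList.length = nt.toList

lemma pvMatches_le (cs : List Char) (i : Nat) (nt : String) (h : pvMatches cs i nt) :
    nt.toList.length ≤ cs.length - i := by
  unfold pvMatches at h
  have h2 := congrArg List.length h
  simp only [List.length_take, List.length_drop] at h2
  omega

lemma find_none (S : List String) (cs : List Char) (i : Nat)
    (h : tokenize_rhs_find S cs i = none) : ∀ m ∈ S, ¬ pvMatches cs i m := by
  induction S with
  | nil => simp
  | cons x rest ih =>
      unfold tokenize_rhs_find at h
      by_cases hc : (cs.drop i).take x.toList.length = x.toList
      · rw [if_pos hc] at h; exact absurd h (by simp)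
      · rw [if_neg hc] at h
        intro m hm
        rcases List.mem_cons.mp hm with rfl | hm
        · simpa [pvMatches] using hc
        · exact ih h m hm

lemma find_some (S : List String) (cs : List Char) (i : Nat) (nt : String)
    (hp : S.Pairwise (fun a b => b.toList.length ≤ a.toList.length))
    (h : tokenize_rhs_find S cs i = some nt) :
    nt ∈ S ∧ pvMatches cs i nt ∧ ∀ m ∈ S, pvMatches cs i m → m.toList.length ≤ nt.toList.length := by
  induction S with
  | nil => simp [tokenize_rhs_find] at h
  | cons x rest ih =>
      rcases List.pairwise_cons.mp hp with ⟨hx, hrest⟩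
      unfold tokenize_rhs_find at h
      by_cases hc : (cs.drop i).take x.toList.length = x.toList
      · rw [if_pos hc] at h
        obtain rfl : x = nt := Option.some.inj h
        refine ⟨by simp, hc, ?_⟩
        intro m hm _
        rcases List.mem_cons.mp hm with rfl | hm
        · exact le_refl _
        · exact hx m hm
      · rw [if_neg hc] at h
        rcases ih hrest h with ⟨h1, h2, h3⟩
        refine ⟨by simp [h1], h2, ?_⟩
        intro m hm hmm
        rcases List.mem_cons.mp hm with rfl | hm
        · exact absurd hmm hc
        · exact h3 m hm hmm

lemma scan_some (vnSet : PySem.Set String) (cs : List Char) (i : Nat) :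
    ∀ b L, tokenize_rhs_alt_scan vnSet cs i b = some L →
      2 ≤ L ∧ L ≤ b ∧ PySem.Set.contains vnSet (String.ofList ((cs.drop i).take L)) = true ∧
      ∀ L', L < L' → L' ≤ b → PySem.Set.contains vnSet (String.ofList ((cs.drop i).take L')) = false := by
  intro b
  induction b with
  | zero => intro L h; simp [tokenize_rhs_alt_scan] at h
  | succ n ih =>
      intro L h
      match n with
      | 0 => simp [tokenize_rhs_alt_scan] at h
      | k + 1 =>
          unfold tokenize_rhs_alt_scan at h
          by_cases hc : PySem.Set.contains vnSet (String.ofList ((cs.drop i).take (k + 2))) = true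
          · rw [if_pos hc] at h
            obtain rfl : k + 2 = L := Option.some.inj h
            exact ⟨by omega, le_refl _, hc, fun L' h1 h2 => by omega⟩
          · rw [if_neg hc] at h
            rcases ih L h with ⟨h1, h2, h3, h4⟩
            refine ⟨h1, by omega, h3, ?_⟩
            intro L' hL1 hL2
            rcases Nat.lt_or_ge L' (k + 2) with hcc | hcc
            · exact h4 L' hL1 (by omega)
            · have hEq : L' = k + 2 := by omega
              subst hEq
              exact Bool.eq_false_iff.mpr hc

lemma scan_none (vnSet : PySem.Set String) (cs : List Char) (i : Nat) :
    ∀ b, tokenize_rhs_alt_scan vnSet cs i b = none →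
      ∀ L, 2 ≤ L → L ≤ b → PySem.Set.contains vnSet (String.ofList ((cs.drop i).take L)) = false := by
  intro b
  induction b with
  | zero => intro _ L h1 h2; omega
  | succ n ih =>
      intro h L h1 h2
      match n with
      | 0 => omega
      | k + 1 =>
          unfold tokenize_rhs_alt_scan at h
          by_cases hc : PySem.Set.contains vnSet (String.ofList ((cs.drop i).take (k + 2))) = true
          · rw [if_pos hc] at h; exact absurd h (by simp)
          · rw [if_neg hc] at h
            rcases Nat.lt_or_ge L (k + 2) with hcc | hcc
            · exact ih h L h1 (by omega)
            · have hEq : L = k + 2 := by omega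
              subst hEq
              exact Bool.eq_false_iff.mpr hc

lemma maxlen_ge (VN : List String) : ∀ m, (∀ nt ∈ VN, nt.toList.length ≤ tokenize_rhs_alt_maxlen VN m) ∧ m ≤ tokenize_rhs_alt_maxlen VN m := by
  induction VN with
  | nil => intro m; simp [tokenize_rhs_alt_maxlen]
  | cons x rest ih =>
      intro m
      unfold tokenize_rhs_alt_maxlen
      have h1 := (ih (if x.toList.length > m then x.toList.length else m)).1
      have h2 := (ih (if x.toList.length > m then x.toList.length else m)).2
      have hx : x.toList.length ≤ if x.toList.length > m then x.toList.length else m := by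
        split <;> omega
      have hm : m ≤ if x.toList.length > m then x.toList.length else m := by
        split <;> omega
      refine ⟨?_, by omega⟩
      intro nt hnt
      rcases List.mem_cons.mp hnt with rfl | hnt
      · omega
      · exact h1 nt hnt

lemma contains_ofList_iff (xs : List String) (x : String) :
    PySem.Set.contains (PySem.Set.ofList xs) x = true ↔ x ∈ xs := by
  simp [PySem.Set.contains, PySem.Set.mem_ofList]

lemma take_one_drop (cs : List Char) (i : Nat) (h : i < cs.length) :
    (cs.drop i).take 1 = [cs.getD i ' '] := by
  have h0 : 0 < (cs.drop i).length := by simp; omega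
  rcases h' : cs.drop i with _ | ⟨a, t⟩
  · rw [h'] at h0; simp at h0
  · have h2 := List.getElem_drop (xs := cs) (i := i) (j := 0) (h := by simpa using h)
    simp [h'] at h2
    simp [← h2, List.getD_eq_getElem?_getD, List.getElem?_eq_getElem h]

-- the candidate probed by the B side genuinely matches at i and has length L
lemma cand_matches (cs : List Char) (i L : Nat) (hL : L ≤ cs.length - i) :
    pvMatches cs i (String.ofList ((cs.drop i).take L)) ∧
    (String.ofList ((cs.drop i).take L)).toList.length = L := by
  have hlen : ((cs.drop i).take L).length = L := by
    simp; omega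
  constructor
  · unfold pvMatches
    simp [String.toList_ofList, hlen]
  · simp [String.toList_ofList, hlen]

lemma loop_eq (VN : List String) (cs : List Char) (hpre : "" ∉ VN) :
    ∀ fuel i syms,
      tokenize_rhs_loop (PySem.List.sorted VN (fun nt => nt.toList.length) true) cs fuel i syms =
      tokenize_rhs_alt_loop (PySem.Set.ofList VN) (tokenize_rhs_alt_maxlen VN 0) cs fuel i syms := by
  intro fuel
  induction fuel with
  | zero => intro i syms; rfl
  | succ fuel ih =>
      intro i syms
      unfold tokenize_rhs_loop tokenize_rhs_alt_loop
      by_cases hi : i < cs.length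
      · simp only [hi, if_true]
        have hp := PySem.List.sorted_pairwise_rev VN (fun nt => nt.toList.length)
        rcases hfind : tokenize_rhs_find (PySem.List.sorted VN (fun nt => nt.toList.length) true) cs i with _ | nt
        · -- A: no match at i ⇒ B's probe finds nothing either
          have hnone := find_none _ cs i hfind
          have hscan : tokenize_rhs_alt_scan (PySem.Set.ofList VN) cs i (min (tokenize_rhs_alt_maxlen VN 0) (cs.length - i)) = none := by
            rcases hs : tokenize_rhs_alt_scan (PySem.Set.ofList VN) cs i (min (tokenize_rhs_alt_maxlen VN 0) (cs.length - i)) with _ | L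
            · rfl
            · rcases scan_some _ cs i _ L hs with ⟨h2, hb, hc, _⟩
              have hmemVN := (contains_ofList_iff VN _).mp hc
              have hmemS : String.ofList ((cs.drop i).take L) ∈ PySem.List.sorted VN (fun nt => nt.toList.length) true :=
                (PySem.List.mem_sorted VN _ true _).mpr hmemVN
              have hm := (cand_matches cs i L (by omega)).1
              exact absurd hm (hnone _ hmemS)
          rw [hscan]
          exact ih (i + 1) _
        · rcases find_some _ cs i nt hp hfind with ⟨hmem, hmatch, hmax⟩
          have hmemVN : nt ∈ VN := (PySem.List.mem_sorted VN _ true nt).mp hmem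
          have hlen_pos : 1 ≤ nt.toList.length := by
            by_contra hcon
            have hnil : nt.toList = [] := List.length_eq_zero_iff.mp (by omega)
            exact hpre (String.toList_eq_nil_iff.mp hnil ▸ hmemVN)
          have hle_i : nt.toList.length ≤ cs.length - i := pvMatches_le cs i nt hmatch
          have hle_max : nt.toList.length ≤ tokenize_rhs_alt_maxlen VN 0 := (maxlen_ge VN 0).1 nt hmemVN
          have hcand_nt : String.ofList ((cs.drop i).take nt.toList.length) = nt := by
            have : (String.ofList ((cs.drop i).take nt.toList.length)).toList = nt.toList := by
              simp [String.toList_ofList]; exact hmatch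
            exact String.toList_inj.mp this
          by_cases h2 : 2 ≤ nt.toList.length
          · -- B's probe must find exactly nt.toList.length
            have hscan : tokenize_rhs_alt_scan (PySem.Set.ofList VN) cs i (min (tokenize_rhs_alt_maxlen VN 0) (cs.length - i)) = some nt.toList.length := by
              rcases hs : tokenize_rhs_alt_scan (PySem.Set.ofList VN) cs i (min (tokenize_rhs_alt_maxlen VN 0) (cs.length - i)) with _ | L
              · exfalso
                have hfalse := scan_none _ cs i _ hs nt.toList.length h2 (by omega)
                rw [hcand_nt] at hfalse
                simp at hfalse
                exact hfalse hmemVN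
              · rcases scan_some _ cs i _ L hs with ⟨hL2, hLb, hc, hmaxB⟩
                have hmemVN' := (contains_ofList_iff VN _).mp hc
                have hmemS' : String.ofList ((cs.drop i).take L) ∈ PySem.List.sorted VN (fun nt => nt.toList.length) true :=
                  (PySem.List.mem_sorted VN _ true _).mpr hmemVN'
                rcases cand_matches cs i L (by omega) with ⟨hmL, hlenL⟩
                have hLle : L ≤ nt.toList.length := by
                  have := hmax _ hmemS' hmL
                  omega
                have hntL : nt.toList.length ≤ L := by
                  by_contra hcon
                  have hfalse := hmaxB nt.toList.length (by omega) (by omega)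
                  rw [hcand_nt] at hfalse
                  simp at hfalse
                  exact hfalse hmemVN
                have hEq : L = nt.toList.length := by omega
                rw [hEq]
            rw [hscan]
            dsimp only
            rw [hcand_nt]
            exact ih (i + nt.toList.length) _
          · -- |nt| = 1 : A appends nt = the single character; B's probe finds nothing
            have h1 : nt.toList.length = 1 := by omega
            have hscan : tokenize_rhs_alt_scan (PySem.Set.ofList VN) cs i (min (tokenize_rhs_alt_maxlen VN 0) (cs.length - i)) = none := by
              rcases hs : tokenize_rhs_alt_scan (PySem.Set.ofList VN) cs i (min (tokenize_rhs_alt_maxlen VN 0) (cs.length - i)) with _ | L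
              · rfl
              · rcases scan_some _ cs i _ L hs with ⟨hL2, hLb, hc, _⟩
                have hmemVN' := (contains_ofList_iff VN _).mp hc
                have hmemS' : String.ofList ((cs.drop i).take L) ∈ PySem.List.sorted VN (fun nt => nt.toList.length) true :=
                  (PySem.List.mem_sorted VN _ true _).mpr hmemVN'
                rcases cand_matches cs i L (by omega) with ⟨hmL, hlenL⟩
                have := hmax _ hmemS' hmL
                omega
            have hnt_char : nt = String.ofList [cs.getD i ' '] := by
              have hl : nt.toList = [cs.getD i ' '] := by
                rw [← take_one_drop cs i hi, ← h1]
                exact hmatch.symm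
              exact String.toList_inj.mp (by simp [String.toList_ofList, hl])
            rw [hscan]
            dsimp only
            rw [← hnt_char]
            have hstep : i + nt.toList.length = i + 1 := by omega
            rw [hstep]
            exact ih (i + 1) _
      · simp [hi]

-- ===== VERDICT (by name: the statement is the Claim_ definition above) =====
theorem tokenize_rhs_spec : Claim_equal_tokenize_rhs := by
  intro rhs VN VT _ hpre
  unfold Spec_tokenize_rhs tokenize_rhs tokenize_rhs_alt
  exact loop_eq VN rhs.toList hpre (rhs.toList.length + 1) 0 []
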